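-- pv_equiv track=rewrite | github.com/daralynnrhode/sds-data-manager | sds_in_a_box/lambdas/file-indexer/indexer.py | _check_for_matching_filetype
-- ===== SOURCE A (Python) =====
-- def _check_for_matching_filetype(pattern, filename):
--     # This function loads in the
--     split_filename = filename.replace("_", ".").split(".")
--
--     if len(split_filename) != len(pattern):
--         return None
--
--     i = 0
--     file_dictionary = {}
--     for field in pattern:
--         if pattern[field] == '*':
--             file_dictionary[field] = split_filename[i]
--         elif pattern[field] == split_filename[i]:
--             file_dictionary[field] == split_filename[i]
--         else:
--             return None
--         i += 1
--
--     return file_dictionary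
-- ===== SOURCE B (Python) =====
-- def _match(items, parts):
--     # divide and conquer on the paired field/segment lists: split at the middle,
--     # match each half independently, merge the halves' wildcard captures in order
--     if not items:
--         return {}
--     if len(items) == 1:
--         (field, value), seg = items[0], parts[0]
--         if value == '*':
--             return {field: seg}
--         return {} if value == seg else None
--     mid = len(items) // 2
--     left = _match(items[:mid], parts[:mid])
--     right = _match(items[mid:], parts[mid:])
--     if left is None or right is None:
--         return None
--     return {**left, **right}
--
--
-- def _check_for_matching_filetype(pattern, filename):
--     parts = filename.replace("_", ".").split(".")
--     if len(parts) != len(pattern):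
--         return None
--     return _match(list(pattern.items()), parts)
-- ===== Notes on version B (the rewrite author's own statement) =====
-- stated objective: alternative
-- what changed: Replaces A's index-counted imperative loop over a mutated accumulator dict by a divide-and-conquer: the paired (field,value)/segment lists are split at the middle, each half is matched recursively, and the halves' wildcard captures are merged in order.
-- crash fix: A raises KeyError (its dead-looking line 'file_dictionary[field] == split_filename[i]' looks up a never-stored key) whenever the split filename has the pattern's length and the first non-wildcard field's value equals its segment; B returns the dict of the wildcard fields there. — e.g. on _check_for_matching_filetype([("a", "b")], "b"): A raises KeyError, B returns some []
import Mathlib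
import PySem

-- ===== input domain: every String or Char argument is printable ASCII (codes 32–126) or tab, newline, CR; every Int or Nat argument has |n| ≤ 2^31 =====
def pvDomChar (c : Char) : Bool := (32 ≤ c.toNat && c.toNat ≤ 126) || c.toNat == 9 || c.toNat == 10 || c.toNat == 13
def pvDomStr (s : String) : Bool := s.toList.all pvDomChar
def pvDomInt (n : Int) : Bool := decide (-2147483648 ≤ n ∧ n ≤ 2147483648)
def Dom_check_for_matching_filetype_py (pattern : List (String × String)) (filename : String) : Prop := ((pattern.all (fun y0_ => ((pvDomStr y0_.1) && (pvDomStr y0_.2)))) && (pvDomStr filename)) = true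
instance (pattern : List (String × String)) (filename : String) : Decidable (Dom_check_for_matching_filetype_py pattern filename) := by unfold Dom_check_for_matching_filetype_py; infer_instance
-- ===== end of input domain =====

-- B replaces A's index-counted loop with a mutated accumulator dict by a divide-and-conquer
-- on the paired (field,value)/segment lists (split at the middle, match each half, merge the
-- halves' wildcard captures in order); objective: alternative.

-- ===== PORT A =====
-- A's for-loop over the dict's fields with counter i and accumulator dict.
-- `pattern[field]` is the value paired with `field` (dict keys are unique; Pre_ states so).
-- `split_filename[i]` never raises inside the loop (i < len(pattern) = len(parts)), ported as getD.
-- In the elif branch Python evaluates `file_dictionary[field]`, which raises KeyError when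
-- `field` is absent; the port returns `none` there (the input is excluded by Pre_).
def pvALoop (parts : List String) : List (String × String) → Nat → PySem.Dict String String → Option (List (String × String))
  | [], _, acc => some acc.items
  | (field, v) :: rest, i, acc =>
    if v = "*" then pvALoop parts rest (i + 1) (acc.insert field (parts.getD i ""))
    else if v = parts.getD i "" then
      match acc.get? field with
      | some _ => pvALoop parts rest (i + 1) acc
      | none => none            -- Python: KeyError
    else none

def check_for_matching_filetype_py (pattern : List (String × String)) (filename : String) : Option (List (String × String)) :=
  let parts := (PySem.Str.split? (PySem.Str.replace filename "_" ".") ".").getD []  -- sep "." ≠ "": split? never none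
  if parts.length ≠ pattern.length then none
  else pvALoop parts pattern 0 PySem.Dict.empty

-- ===== PORT B =====
-- B's divide-and-conquer _match: split at mid = len(items)//2 into items[:mid]/parts[:mid]
-- and items[mid:]/parts[mid:]; parts is nonempty whenever items is a singleton (the caller
-- checks the lengths are equal and both halves split at the same index), so parts[0] is
-- ported as headD "".
def pvBMatch : List (String × String) → List String → Option (List (String × String))
  | [], _ => some []
  | [(field, value)], parts =>
    let seg := parts.headD ""
    if value = "*" then some [(field, seg)]
    else if value = seg then some [] else none
  | x :: y :: rest, parts =>
    let items := x :: y :: rest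
    let mid := items.length / 2
    match pvBMatch (items.take mid) (parts.take mid),
          pvBMatch (items.drop mid) (parts.drop mid) with
    | some l, some r => some (l ++ r)
    | _, _ => none
termination_by items _ => items.length
decreasing_by
  · simp [List.length_take]; omega
  · simp; omega

def check_for_matching_filetype_py_alt (pattern : List (String × String)) (filename : String) : Option (List (String × String)) :=
  let parts := (PySem.Str.split? (PySem.Str.replace filename "_" ".") ".").getD []
  if parts.length ≠ pattern.length then none
  else pvBMatch pattern parts

-- ===== PRECONDITION & SPEC =====
-- Pre_ requires (a) distinct keys — the list encodes a Python dict, whose keys are necessarily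
-- distinct, so this excludes no representable Python input — and (b) that A does not raise:
-- A's dead-looking line `file_dictionary[field] == split_filename[i]` raises KeyError whenever a
-- non-wildcard field's value equals its filename segment (the field was never stored), i.e. exactly
-- when the lengths match and the first non-'*' field literally matches; those inputs are excluded.
def Pre_check_for_matching_filetype_py (pattern : List (String × String)) (filename : String) : Prop :=
  (pattern.map Prod.fst).Nodup ∧
  (let parts := (PySem.Str.split? (PySem.Str.replace filename "_" ".") ".").getD []
   parts.length = pattern.length →
     Option.all (fun z => z.1.2 != z.2) ((pattern.zip parts).find? (fun z => z.1.2 != "*")) = true)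
instance (pattern : List (String × String)) (filename : String) : Decidable (Pre_check_for_matching_filetype_py pattern filename) := by
  unfold Pre_check_for_matching_filetype_py; infer_instance

def pvWitness_check_for_matching_filetype_py : (List (String × String)) × String :=
  ([("mission", "*"), ("level", "*")], "imap.l2")

-- A raises KeyError whenever the split filename has the pattern's length and the first
-- non-wildcard field's value equals its segment; B returns the dict of the wildcard fields there.
def Raises_check_for_matching_filetype_py (pattern : List (String × String)) (filename : String) : Prop :=
  (let parts := (PySem.Str.split? (PySem.Str.replace filename "_" ".") ".").getD []
   parts.length = pattern.length ∧
     Option.any (fun z => z.1.2 == z.2) ((pattern.zip parts).find? (fun z => z.1.2 != "*")) = true)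
instance (pattern : List (String × String)) (filename : String) : Decidable (Raises_check_for_matching_filetype_py pattern filename) := by
  unfold Raises_check_for_matching_filetype_py; infer_instance

def pvRaiseWitness_check_for_matching_filetype_py : (List (String × String)) × String := ([("a", "b")], "b")
def pvRaiseWitnessOut_check_for_matching_filetype_py : Option (List (String × String)) := some []

def Spec_check_for_matching_filetype_py (pattern : List (String × String)) (filename : String) (out : Option (List (String × String))) : Prop := out = check_for_matching_filetype_py_alt pattern filename
instance (pattern : List (String × String)) (filename : String) (out : Option (List (String × String))) : Decidable (Spec_check_for_matching_filetype_py pattern filename out) := by unfold Spec_check_for_matching_filetype_py; infer_instance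

-- ===== CLAIM (what is proved, stated in full; the proofs are below) =====
def Claim_equal_check_for_matching_filetype_py : Prop := ∀ (pattern : List (String × String)) (filename : String), Dom_check_for_matching_filetype_py pattern filename → Pre_check_for_matching_filetype_py pattern filename → Spec_check_for_matching_filetype_py pattern filename (check_for_matching_filetype_py pattern filename)

def Claim_raises_check_for_matching_filetype_py : Prop := (∀ (pattern : List (String × String)) (filename : String), Dom_check_for_matching_filetype_py pattern filename → Raises_check_for_matching_filetype_py pattern filename → ¬ Pre_check_for_matching_filetype_py pattern filename) ∧ (Dom_check_for_matching_filetype_py (pvRaiseWitness_check_for_matching_filetype_py.1) (pvRaiseWitness_check_for_matching_filetype_py.2) ∧ Raises_check_for_matching_filetype_py (pvRaiseWitness_check_for_matching_filetype_py.1) (pvRaiseWitness_check_for_matching_filetype_py.2) ∧ check_for_matching_filetype_py_alt (pvRaiseWitness_check_for_matching_filetype_py.1) (pvRaiseWitness_check_for_matching_filetype_py.2) = pvRaiseWitnessOut_check_for_matching_filetype_py)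

-- ===== LEMMAS AND PROOFS =====

-- Both ports are characterised by the same closed form: none iff some pair mismatches,
-- otherwise exactly the wildcard pairs in pattern order.

theorem pv_loop_eq (parts : List String) (pattern : List (String × String)) (i : Nat)
    (acc : PySem.Dict String String)
    (hlen : pattern.length + i = parts.length)
    (hnd : (pattern.map Prod.fst).Nodup)
    (hacc : ∀ p ∈ pattern, acc.get? p.1 = none)
    (hpre : Option.all (fun z => z.1.2 != z.2) (((pattern.zip (parts.drop i))).find? (fun z => z.1.2 != "*")) = true) :
    pvALoop parts pattern i acc =
      if ((pattern.map Prod.snd).zip (parts.drop i)).any (fun z => z.1 != "*" && z.1 != z.2) then none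
      else some (acc.items ++ ((pattern.zip (parts.drop i)).filter (fun z => z.1.2 == "*")).map (fun z => (z.1.1, z.2))) := by
  induction pattern generalizing i acc with
  | nil => simp [pvALoop]
  | cons hd tl ih =>
    obtain ⟨field, v⟩ := hd
    have hi : i < parts.length := by simp at hlen; omega
    have hdrop : parts.drop i = parts[i] :: parts.drop (i + 1) := List.drop_eq_getElem_cons hi
    have hg : parts.getD i "" = parts[i] := by
      simp [List.getD_eq_getElem?_getD, List.getElem?_eq_getElem hi]
    rw [hdrop] at hpre ⊢
    simp only [List.map_cons, List.zip_cons_cons] at hpre ⊢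
    simp only [List.map_cons, List.nodup_cons] at hnd
    by_cases hv : v = "*"
    · subst hv
      rw [List.find?_cons_of_neg (by simp)] at hpre
      have hne : ∀ p ∈ tl, (acc.insert field parts[i]).get? p.1 = none := by
        intro p hp
        rw [PySem.Dict.get?_insert_of_ne _ _ (by
          intro h; exact hnd.1 (h ▸ List.mem_map_of_mem hp))]
        exact hacc p (List.mem_cons_of_mem _ hp)
      have hitems : (acc.insert field parts[i]).items = acc.items ++ [(field, parts[i])] := by
        apply PySem.Dict.items_insert_of_not_contains
        rw [PySem.Dict.contains_eq_isSome_get?, hacc (field, "*") List.mem_cons_self]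
        rfl
      rw [pvALoop, if_pos rfl, hg,
        ih (i + 1) _ (by simp at hlen ⊢; omega) hnd.2 hne hpre, hitems]
      have hc : ∀ X : Bool, (("*" != "*" && "*" != parts[i]) || X) = X := by
        intro X
        rw [show (("*" : String) != "*") = false by decide]
        simp
      rw [List.any_cons, List.filter_cons]
      simp only [hc]
      simp
    · by_cases hm : v = parts[i]
      · exfalso
        rw [List.find?_cons_of_pos (by simp [hv])] at hpre
        simp [hm] at hpre
      · rw [pvALoop, if_neg hv, hg, if_neg hm]
        simp [hv, hm]

def pvBChar (pattern : List (String × String)) (parts : List String) : Option (List (String × String)) :=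
  if ((pattern.map Prod.snd).zip parts).any (fun z => z.1 != "*" && z.1 != z.2) then none
  else some (((pattern.zip parts).filter (fun z => z.1.2 == "*")).map (fun z => (z.1.1, z.2)))

theorem pvBChar_append (p1 p2 : List (String × String)) (q1 q2 : List String)
    (h : p1.length = q1.length) :
    pvBChar (p1 ++ p2) (q1 ++ q2) =
      match pvBChar p1 q1, pvBChar p2 q2 with
      | some l, some r => some (l ++ r)
      | _, _ => none := by
  unfold pvBChar
  rw [List.map_append, List.zip_append (by simpa using h), List.zip_append h,
    List.any_append, List.filter_append, List.map_append]
  by_cases h1 : ((p1.map Prod.snd).zip q1).any (fun z => z.1 != "*" && z.1 != z.2)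
  · simp [h1]
  · by_cases h2 : ((p2.map Prod.snd).zip q2).any (fun z => z.1 != "*" && z.1 != z.2)
    · simp [h1, h2]
    · simp [h1, h2]

theorem pvBMatch_eq_aux (n : Nat) : ∀ (pattern : List (String × String)) (parts : List String),
    pattern.length ≤ n → pattern.length = parts.length →
    pvBMatch pattern parts = pvBChar pattern parts := by
  induction n with
  | zero =>
    intro pattern parts hle hlen
    have : pattern = [] := List.eq_nil_of_length_eq_zero (by omega)
    subst this
    simp [pvBMatch, pvBChar]
  | succ n ih =>
    intro pattern parts hle hlen
    match pattern with
    | [] => simp [pvBMatch, pvBChar]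
    | [(field, value)] =>
      match parts with
      | [] => simp at hlen
      | p :: q :: ps => simp at hlen
      | [p] =>
        rw [pvBMatch]
        unfold pvBChar
        by_cases hv : value = "*"
        · subst hv; simp
        · by_cases hp : value = p
          · subst hp; simp [hv]
          · simp [hv, hp]
    | x :: y :: rest =>
      rw [pvBMatch]
      have hlen2 : 2 ≤ (x :: y :: rest).length := by simp
      set items : List (String × String) := x :: y :: rest with hitems
      set mid := items.length / 2 with hmid
      have h1 : 1 ≤ mid := by
        have : 2 ≤ items.length := hlen2
        omega
      have h2 : mid < items.length := by
        have : 2 ≤ items.length := hlen2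
        omega
      have htk : (items.take mid).length = mid := by simp [List.length_take]; omega
      have hptk : (parts.take mid).length = mid := by simp [List.length_take]; omega
      rw [ih (items.take mid) (parts.take mid) (by omega) (by omega),
        ih (items.drop mid) (parts.drop mid) (by simp; omega) (by simp; omega)]
      rw [show pvBChar items parts =
            pvBChar (items.take mid ++ items.drop mid) (parts.take mid ++ parts.drop mid) by
          rw [List.take_append_drop, List.take_append_drop],
        pvBChar_append _ _ _ _ (by omega)]

theorem pvBMatch_eq (pattern : List (String × String)) (parts : List String)
    (hlen : pattern.length = parts.length) :
    pvBMatch pattern parts =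
      if ((pattern.map Prod.snd).zip parts).any (fun z => z.1 != "*" && z.1 != z.2) then none
      else some (((pattern.zip parts).filter (fun z => z.1.2 == "*")).map (fun z => (z.1.1, z.2))) := by
  exact pvBMatch_eq_aux pattern.length pattern parts le_rfl hlen

-- ===== VERDICT (by name: the statement is the Claim_ definition above) =====
theorem check_for_matching_filetype_py_spec : Claim_equal_check_for_matching_filetype_py := by
  intro pattern filename _ hpre
  obtain ⟨hnd, hpre2⟩ := hpre
  unfold Spec_check_for_matching_filetype_py
  unfold check_for_matching_filetype_py check_for_matching_filetype_py_alt
  simp only at hpre2 ⊢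
  set parts := (PySem.Str.split? (PySem.Str.replace filename "_" ".") ".").getD [] with hparts
  by_cases hlen : parts.length ≠ pattern.length
  · rw [if_pos hlen, if_pos hlen]
  · rw [ne_eq, not_not] at hlen
    rw [if_neg (by omega), if_neg (by omega)]
    rw [pv_loop_eq parts pattern 0 PySem.Dict.empty (by omega) hnd
      (fun p _ => PySem.Dict.get?_empty p.1) (by simpa using hpre2 hlen),
      pvBMatch_eq pattern parts (by omega)]
    simp [PySem.Dict.empty]

@[simp] theorem check_for_matching_filetype_py_raises : Claim_raises_check_for_matching_filetype_py := by
  unfold Claim_raises_check_for_matching_filetype_py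
  refine ⟨?_, by decide, by decide, ?_⟩
  case refine_2 =>
    show check_for_matching_filetype_py_alt [("a", "b")] "b" = some []
    unfold check_for_matching_filetype_py_alt
    rw [show (PySem.Str.split? (PySem.Str.replace "b" "_" ".") ".").getD [] = ["b"] from by decide]
    rw [if_neg (by decide), pvBMatch_eq _ _ (by decide)]
    decide
  intro pattern filename _ hr hpre
  obtain ⟨hlen, hany⟩ := hr
  obtain ⟨_, hpre2⟩ := hpre
  have hall := hpre2 hlen
  cases hfind : ((pattern.zip ((PySem.Str.split? (PySem.Str.replace filename "_" ".") ".").getD [])).find? (fun z => z.1.2 != "*")) with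
  | none => rw [hfind] at hany; simp [Option.any] at hany
  | some z =>
    rw [hfind] at hany hall
    simp [Option.any, Option.all] at hany hall
    exact hall hany
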